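-- pv_equiv track=rewrite | github.com/embydextrous/Interview | stack/0-rev.py | identifyAndReplace
-- ===== SOURCE A (Python) =====
-- def identifyAndReplace(exp):
--     a = list(exp)
--     s = []
--     for i in range(len(a)):
--         c = a[i]
--         if c == '(':
--             s.append(i)
--         elif c == ')':
--             if len(s) > 0:
--                 a[s.pop()] = '0'
--                 a[i] = '1'
--             else:
--                 a[i] = '-1'
--     while len(s) > 0:
--         a[s.pop()] = '-1'
--     return "".join(a)
-- ===== SOURCE B (Python) =====
-- def identifyAndReplace(exp):
--     # Forward pass: classify every ')' with an open-paren counter.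
--     fwd = []
--     open_cnt = 0
--     for c in exp:
--         if c == ')':
--             if open_cnt > 0:
--                 open_cnt -= 1
--                 fwd.append('1')
--             else:
--                 fwd.append('-1')
--         else:
--             if c == '(':
--                 open_cnt += 1
--             fwd.append(c)
--     # Backward pass: classify every '(' with a close-paren counter.
--     rev_out = []
--     close_cnt = 0
--     for c0, c in zip(reversed(exp), reversed(fwd)):
--         if c0 == '(':
--             if close_cnt > 0:
--                 close_cnt -= 1
--                 rev_out.append('0')
--             else:
--                 rev_out.append('-1')
--         else:
--             if c0 == ')':
--                 close_cnt += 1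
--             rev_out.append(c)
--     rev_out.reverse()
--     return ''.join(rev_out)
-- ===== Notes on version B (the rewrite author's own statement) =====
-- stated objective: alternative
-- what changed: Replaces A's index-stack pass plus final stack-unwinding loop (with in-place writes into the char array) by two counter passes: a forward open-paren counter classifies every closing paren and a backward close-paren counter classifies every opening paren, then the marks are joined.
import Mathlib
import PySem

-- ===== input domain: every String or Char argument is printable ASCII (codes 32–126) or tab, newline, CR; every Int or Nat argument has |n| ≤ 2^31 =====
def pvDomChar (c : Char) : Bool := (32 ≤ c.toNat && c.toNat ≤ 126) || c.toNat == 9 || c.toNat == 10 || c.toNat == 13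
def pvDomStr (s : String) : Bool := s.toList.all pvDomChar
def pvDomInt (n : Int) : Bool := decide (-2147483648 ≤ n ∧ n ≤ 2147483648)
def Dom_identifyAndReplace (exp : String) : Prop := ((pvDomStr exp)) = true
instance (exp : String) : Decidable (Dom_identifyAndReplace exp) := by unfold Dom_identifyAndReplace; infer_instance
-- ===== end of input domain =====

-- B replaces A's index-stack pass (plus final stack-unwinding loop) by two counter passes —
-- a forward pass classifying every closing paren and a backward pass classifying every opening paren —
-- an alternative algorithm of the same cost.


-- ===== PORT A =====
-- one iteration of A's `for i in range(len(a))` loop; state = (a, s).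
-- every index read/written is in range, so pySetD (the total form of a[i]=v) is exact here.
def aStep (st : List String × List Int) (i : Int) : List String × List Int :=
  match PySem.List.pyGet? st.1 i with
  | none => st          -- unreachable: i comes from range(len(a))
  | some c =>
    if c == "(" then (st.1, st.2 ++ [i])
    else if c == ")" then
      match st.2.getLast? with   -- `if len(s) > 0` + `s.pop()` (pop the LAST element)
      | some j => (PySem.List.pySetD (PySem.List.pySetD st.1 j "0") i "1", st.2.dropLast)
      | none => (PySem.List.pySetD st.1 i "-1", st.2)
    else st

-- A's trailing `while len(s) > 0: a[s.pop()] = '-1'`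
def aWhile (a : List String) (s : List Int) : List String :=
  match _h : s.getLast? with
  | none => a
  | some j => aWhile (PySem.List.pySetD a j "-1") s.dropLast
termination_by s.length
decreasing_by
  have hne : s ≠ [] := by intro hs; subst hs; simp at _h
  have := List.length_pos_iff.mpr hne
  simp [List.length_dropLast]; omega

def identifyAndReplace (exp : String) : String :=
  let a := exp.toList.map (fun c => String.ofList [c])
  let r := (PySem.List.pyRange 0 (a.length : Int)).foldl aStep (a, [])
  PySem.Str.join "" (aWhile r.1 r.2)

-- ===== PORT B =====
-- forward pass: classify every ')' with an open-paren counter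
def bFwdStep (st : List String × Int) (c : Char) : List String × Int :=
  if c == ')' then
    if st.2 > 0 then (st.1 ++ ["1"], st.2 - 1) else (st.1 ++ ["-1"], st.2)
  else
    (st.1 ++ [String.ofList [c]], if c == '(' then st.2 + 1 else st.2)

-- backward pass: classify every '(' with a close-paren counter
def bBwdStep (st : List String × Int) (p : Char × String) : List String × Int :=
  if p.1 == '(' then
    if st.2 > 0 then (st.1 ++ ["0"], st.2 - 1) else (st.1 ++ ["-1"], st.2)
  else
    (st.1 ++ [p.2], if p.1 == ')' then st.2 + 1 else st.2)

def identifyAndReplace_alt (exp : String) : String :=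
  let fwd := (exp.toList.foldl bFwdStep ([], 0)).1
  let revOut := ((exp.toList.reverse.zip fwd.reverse).foldl bBwdStep ([], 0)).1
  PySem.Str.join "" revOut.reverse

-- ===== PRECONDITION & SPEC =====
def Spec_identifyAndReplace (exp : String) (out : String) : Prop := out = identifyAndReplace_alt exp
instance (exp : String) (out : String) : Decidable (Spec_identifyAndReplace exp out) := by unfold Spec_identifyAndReplace; infer_instance

-- ===== CLAIM (what is proved, stated in full; the proofs are below) =====
def Claim_equal_identifyAndReplace : Prop := ∀ (exp : String), Dom_identifyAndReplace exp → Spec_identifyAndReplace exp (identifyAndReplace exp)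

-- ===== LEMMAS AND PROOFS =====

-- number of unmatched ')' in a list of chars (right-recursive form)
def uCl : List Char → Nat
  | [] => 0
  | c :: t => if c = '(' then uCl t - 1 else if c = ')' then uCl t + 1 else uCl t

-- the common mark list both programs produce; k = number of currently open '('
def specL : List Char → Nat → List String
  | [], _ => []
  | c :: t, k =>
    if c = '(' then (if uCl t = 0 then "-1" else "0") :: specL t (k + 1)
    else if c = ')' then (if k = 0 then "-1" else "1") :: specL t (k - 1)
    else String.ofList [c] :: specL t k

-- marks as A's main loop leaves them: a surviving '(' is still "(" (fixed by the while loop)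
def specW : List Char → Nat → List String
  | [], _ => []
  | c :: t, k =>
    if c = '(' then (if uCl t = 0 then "(" else "0") :: specW t (k + 1)
    else if c = ')' then (if k = 0 then "-1" else "1") :: specW t (k - 1)
    else String.ofList [c] :: specW t k

-- indices (top of stack first) of '(' that survive A's stack; positions counted from k
def surv : List Char → Nat → List Int
  | [], _ => []
  | c :: t, k =>
    if c = '(' ∧ uCl t = 0 then surv t (k + 1) ++ [(k : Int)] else surv t (k + 1)

-- structural rendering of A's main loop: x = processed prefix, s = stack (TOP AT HEAD), m = rest
def mls : List Char → List String → List Int → List String × List Int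
  | [], x, s => (x, s)
  | c :: m, x, s =>
    if c = '(' then mls m (x ++ ["("]) ((x.length : Int) :: s)
    else if c = ')' then
      match s with
      | j :: s' => mls m (x.set j.toNat "0" ++ ["1"]) s'
      | [] => mls m (x ++ ["-1"]) []
    else mls m (x ++ [String.ofList [c]]) s

def stackWrite (v : String) (a : List String) (idxs : List Int) : List String :=
  idxs.foldl (fun a j => a.set j.toNat v) a

-- B's forward pass, as a structural recursion
def fwdF : List Char → Int → List String
  | [], _ => []
  | c :: t, k =>
    if c = ')' then (if k > 0 then "1" :: fwdF t (k - 1) else "-1" :: fwdF t k)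
    else String.ofList [c] :: fwdF t (if c = '(' then k + 1 else k)

-- B's backward pass, as a structural recursion over the (char, fwd-mark) list in forward order
def bRec : List (Char × String) → List String × Int
  | [] => ([], 0)
  | p :: t =>
    let r := bRec t
    if p.1 = '(' then
      (if r.2 > 0 then ("0" :: r.1, r.2 - 1) else ("-1" :: r.1, r.2))
    else if p.1 = ')' then (p.2 :: r.1, r.2 + 1)
    else (p.2 :: r.1, r.2)

lemma beq_one (c d : Char) : (String.ofList [c] == String.ofList [d]) = (c == d) := by
  by_cases h : c = d
  · subst h; simp
  · have hne : String.ofList [c] ≠ String.ofList [d] := by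
      intro hh
      exact h (by simpa using congrArg String.toList hh)
    simp [h, hne]

lemma stackWrite_cons (v : String) (a : List String) (j : Int) (r : List Int) :
    stackWrite v a (j :: r) = stackWrite v (a.set j.toNat v) r := rfl

-- stack-invariant characterisation of A's main loop
lemma mls_spec : ∀ (m : List Char) (x : List String) (s : List Int),
    (∀ j ∈ s, 0 ≤ j ∧ j.toNat < x.length) →
    mls m x s = (stackWrite "0" (x ++ specW m s.length) (s.take (min s.length (uCl m))),
                 surv m x.length ++ s.drop (min s.length (uCl m))) := by
  intro m
  induction m with
  | nil => intro x s hs; simp [mls, specW, uCl, surv, stackWrite]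
  | cons c m ih =>
    intro x s hs
    by_cases h1 : c = '('
    · subst h1
      rw [show mls ('(' :: m) x s = mls m (x ++ ["("]) ((x.length : Int) :: s) from by
        simp [mls]]
      rw [ih (x ++ ["("]) ((x.length : Int) :: s) (by
        intro j hj
        rcases List.mem_cons.1 hj with h | h
        · subst h; simp
        · exact ⟨(hs j h).1, by have := (hs j h).2; simp; omega⟩)]
      by_cases hu : uCl m = 0
      · simp [specW, surv, uCl, hu, stackWrite, List.append_assoc]
      · simp only [List.length_cons, List.length_append]
        have hW : specW ('(' :: m) s.length = "0" :: specW m (s.length + 1) := by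
          simp [specW, hu]
        have hu2 : uCl ('(' :: m) = uCl m - 1 := by simp [uCl]
        have hmin : min (s.length + 1) (uCl m) = min s.length (uCl m - 1) + 1 := by omega
        have hSv : surv ('(' :: m) x.length = surv m (x.length + 1) := by
          simp [surv, hu]
        rw [hW, hu2, hmin, hSv, List.take_succ_cons, List.drop_succ_cons, stackWrite_cons]
        have hset : ((x ++ ["("]) ++ specW m (s.length + 1)).set ((x.length : Int)).toNat "0"
            = x ++ "0" :: specW m (s.length + 1) := by
          rw [Int.toNat_natCast, List.set_append_left _ _ (by simp),
            List.set_append_right x.length _ le_rfl]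
          simp
        rw [hset]
        simp
    · by_cases h2 : c = ')'
      · subst h2
        cases s with
        | nil =>
          rw [show mls (')' :: m) x [] = mls m (x ++ ["-1"]) [] from by simp [mls]]
          rw [ih (x ++ ["-1"]) [] (by intro j hj; simp at hj)]
          simp [specW, surv, uCl, stackWrite, List.append_assoc]
        | cons j s' =>
          obtain ⟨hj0, hjlt⟩ := hs j (List.mem_cons_self ..)
          rw [show mls (')' :: m) x (j :: s') = mls m (x.set j.toNat "0" ++ ["1"]) s' from by
            simp [mls]]
          rw [ih (x.set j.toNat "0" ++ ["1"]) s' (by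
            intro i hi
            exact ⟨(hs i (List.mem_cons_of_mem _ hi)).1, by
              have := (hs i (List.mem_cons_of_mem _ hi)).2; simp; omega⟩)]
          simp only [List.length_cons, List.length_append, List.length_set]
          have hW : specW (')' :: m) (s'.length + 1) = "1" :: specW m s'.length := by
            simp [specW]
          have hu2 : uCl (')' :: m) = uCl m + 1 := by simp [uCl]
          have hmin : min (s'.length + 1) (uCl m + 1) = min s'.length (uCl m) + 1 := by omega
          have hSv : surv (')' :: m) x.length = surv m (x.length + 1) := by simp [surv]
          rw [hW, hu2, hmin, hSv, List.take_succ_cons, List.drop_succ_cons, stackWrite_cons]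
          have hset : (x ++ "1" :: specW m s'.length).set j.toNat "0"
              = (x.set j.toNat "0" ++ ["1"]) ++ specW m s'.length := by
            rw [List.set_append_left _ _ hjlt]
            simp [List.append_assoc]
          rw [hset]
          simp
      · rw [show mls (c :: m) x s = mls m (x ++ [String.ofList [c]]) s from by
          simp [mls, h1, h2]]
        rw [ih (x ++ [String.ofList [c]]) s (by
          intro i hi
          exact ⟨(hs i hi).1, by have := (hs i hi).2; simp; omega⟩)]
        have hW : specW (c :: m) s.length = String.ofList [c] :: specW m s.length := by
          simp [specW, h1, h2]
        have hu2 : uCl (c :: m) = uCl m := by simp [uCl, h1, h2]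
        have hSv : surv (c :: m) x.length = surv m (x.length + 1) := by simp [surv, h1]
        rw [hW, hu2, hSv]
        simp [List.append_assoc]

-- the while loop rewrites the surviving stack into the final marks
lemma surv_fix : ∀ (m : List Char) (x : List String) (k : Nat),
    (surv m x.length).foldl (fun a j => a.set j.toNat "-1") (x ++ specW m k) = x ++ specL m k := by
  intro m
  induction m with
  | nil => intro x k; simp [surv, specW, specL]
  | cons c m ih =>
    intro x k
    by_cases h1 : c = '('
    · subst h1
      by_cases hu : uCl m = 0
      · have hSv : surv ('(' :: m) x.length = surv m (x.length + 1) ++ [(x.length : Int)] := by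
          simp [surv, hu]
        rw [hSv, List.foldl_append]
        have hx : x ++ specW ('(' :: m) k = (x ++ ["("]) ++ specW m (k + 1) := by
          simp [specW, hu, List.append_assoc]
        rw [hx]
        have := ih (x ++ ["("]) (k + 1)
        simp only [List.length_append, List.length_cons, List.length_nil, Nat.zero_add] at this
        rw [this]
        simp only [List.foldl_cons, List.foldl_nil, Int.toNat_natCast]
        rw [List.set_append_left _ _ (by simp), List.set_append_right x.length _ le_rfl]
        simp [specL, hu, List.append_assoc]
      · have hSv : surv ('(' :: m) x.length = surv m (x.length + 1) := by simp [surv, hu]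
        have hx : x ++ specW ('(' :: m) k = (x ++ ["0"]) ++ specW m (k + 1) := by
          simp [specW, hu, List.append_assoc]
        rw [hSv, hx]
        have := ih (x ++ ["0"]) (k + 1)
        simp only [List.length_append, List.length_cons, List.length_nil, Nat.zero_add] at this
        rw [this]
        simp [specL, hu, List.append_assoc]
    · by_cases h2 : c = ')'
      · subst h2
        have hSv : surv (')' :: m) x.length = surv m (x.length + 1) := by simp [surv]
        have hx : x ++ specW (')' :: m) k
            = (x ++ [if k = 0 then "-1" else "1"]) ++ specW m (k - 1) := by
          simp [specW, List.append_assoc]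
        rw [hSv, hx]
        have := ih (x ++ [if k = 0 then "-1" else "1"]) (k - 1)
        simp only [List.length_append, List.length_cons, List.length_nil, Nat.zero_add] at this
        rw [this]
        simp [specL, List.append_assoc]
      · have hSv : surv (c :: m) x.length = surv m (x.length + 1) := by simp [surv, h1]
        have hx : x ++ specW (c :: m) k = (x ++ [String.ofList [c]]) ++ specW m k := by
          simp [specW, h1, h2, List.append_assoc]
        rw [hSv, hx]
        have := ih (x ++ [String.ofList [c]]) k
        simp only [List.length_append, List.length_cons, List.length_nil, Nat.zero_add] at this
        rw [this]
        simp [specL, h1, h2, List.append_assoc]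

-- every surviving index is a natural number
lemma surv_nonneg : ∀ (m : List Char) (k : Nat), ∀ j ∈ surv m k, 0 ≤ j := by
  intro m
  induction m with
  | nil => intro k j hj; simp [surv] at hj
  | cons c t ih =>
    intro k j hj
    rw [surv] at hj
    split at hj
    · rcases List.mem_append.1 hj with h | h
      · exact ih _ _ h
      · simp at h; subst h; positivity
    · exact ih _ _ hj

-- A's range-foldl is the structural loop (port stack = struct stack reversed)
lemma aFold : ∀ (m : List Char) (x : List String) (s : List Int) (e : Int),
    e = (x.length : Int) + m.length →
    (∀ j ∈ s, 0 ≤ j ∧ j.toNat < x.length) →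
    (PySem.List.pyRange (x.length : Int) e).foldl aStep
        (x ++ m.map (fun c => String.ofList [c]), s.reverse)
      = ((mls m x s).1, (mls m x s).2.reverse) := by
  intro m
  induction m with
  | nil =>
    intro x s e he hs
    have : e = (x.length : Int) := by simpa using he
    subst this
    simp [pysem, mls]
  | cons c m ih =>
    intro x s e he hs
    have hlt : (x.length : Int) < e := by rw [he, List.length_cons]; push_cast; omega
    rw [PySem.List.pyRange_one_cons hlt, List.foldl_cons]
    have hmap : (c :: m).map (fun c => String.ofList [c])
        = String.ofList [c] :: m.map (fun c => String.ofList [c]) := by simp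
    have hget : PySem.List.pyGet? (x ++ (c :: m).map (fun c => String.ofList [c]))
        ((x.length : Int)) = some (String.ofList [c]) := by
      rw [hmap]; exact PySem.List.pyGet?_append_length x _ _
    by_cases h1 : c = '('
    · subst h1
      have hstep : aStep (x ++ ('(' :: m).map (fun c => String.ofList [c]), s.reverse)
          ((x.length : Int))
          = ((x ++ ["("]) ++ m.map (fun c => String.ofList [c]),
             ((x.length : Int) :: s).reverse) := by
        rw [aStep, hget]
        simp only [show ((String.ofList ['('] == ("(" : String))) = true from rfl, if_true]
        simp [hmap, List.append_assoc]
      rw [hstep]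
      have he' : e = (((x ++ ["("]).length : Nat) : Int) + (m.length : Int) := by
        rw [he]; simp; ring
      rw [show ((x.length : Int)) + 1 = (((x ++ ["("]).length : Nat) : Int) by simp]
      rw [ih (x ++ ["("]) ((x.length : Int) :: s) e he' (by
        intro j hj
        rcases List.mem_cons.1 hj with h | h
        · subst h; simp
        · exact ⟨(hs j h).1, by have := (hs j h).2; simp; omega⟩)]
      rw [show mls ('(' :: m) x s = mls m (x ++ ["("]) ((x.length : Int) :: s) from by
        simp [mls]]
    · by_cases h2 : c = ')'
      · subst h2
        cases s with
        | nil =>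
          have hstep : aStep (x ++ (')' :: m).map (fun c => String.ofList [c]),
              ([] : List Int).reverse) ((x.length : Int))
              = ((x ++ ["-1"]) ++ m.map (fun c => String.ofList [c]),
                 ([] : List Int).reverse) := by
            rw [aStep, hget]
            simp only [show ((String.ofList [')'] == ("(" : String))) = false from rfl,
              show ((String.ofList [')'] == (")" : String))) = true from rfl,
              Bool.false_eq_true, if_false, if_true, List.reverse_nil, List.getLast?_nil]
            rw [hmap]
            simp only [PySem.List.pySetD_natCast]
            rw [List.set_append_right x.length _ le_rfl]
            simp [List.append_assoc]
          rw [hstep]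
          have he' : e = (((x ++ ["-1"]).length : Nat) : Int) + (m.length : Int) := by
            rw [he]; simp; ring
          rw [show ((x.length : Int)) + 1 = (((x ++ ["-1"]).length : Nat) : Int) by simp]
          rw [ih (x ++ ["-1"]) [] e he' (by intro j hj; simp at hj)]
          rw [show mls (')' :: m) x [] = mls m (x ++ ["-1"]) [] from by simp [mls]]
        | cons j s' =>
          obtain ⟨hj0, hjlt⟩ := hs j (List.mem_cons_self ..)
          have hstep : aStep (x ++ (')' :: m).map (fun c => String.ofList [c]),
              (j :: s').reverse) ((x.length : Int))
              = ((x.set j.toNat "0" ++ ["1"]) ++ m.map (fun c => String.ofList [c]),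
                 s'.reverse) := by
            rw [aStep, hget]
            simp only [show ((String.ofList [')'] == ("(" : String))) = false from rfl,
              show ((String.ofList [')'] == (")" : String))) = true from rfl,
              Bool.false_eq_true, if_false, if_true, List.getLast?_reverse, List.head?_cons,
              List.dropLast_reverse, List.tail_cons]
            rw [hmap]
            rw [PySem.List.pySetD_of_nonneg _ _ hj0]
            rw [List.set_append_left _ _ hjlt]
            rw [PySem.List.pySetD_natCast]
            rw [show x.length = (x.set j.toNat "0").length from by simp]
            rw [List.set_append_right _ _ le_rfl]
            simp [List.append_assoc]
          rw [hstep]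
          have he' : e = (((x.set j.toNat "0" ++ ["1"]).length : Nat) : Int)
              + (m.length : Int) := by
            rw [he]; simp; ring
          rw [show ((x.length : Int)) + 1 = (((x.set j.toNat "0" ++ ["1"]).length : Nat) : Int)
            by simp]
          rw [ih (x.set j.toNat "0" ++ ["1"]) s' e he' (by
            intro i hi
            exact ⟨(hs i (List.mem_cons_of_mem _ hi)).1, by
              have := (hs i (List.mem_cons_of_mem _ hi)).2; simp; omega⟩)]
          rw [show mls (')' :: m) x (j :: s') = mls m (x.set j.toNat "0" ++ ["1"]) s' from by
            simp [mls]]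
      · have hstep : aStep (x ++ (c :: m).map (fun c => String.ofList [c]), s.reverse)
            ((x.length : Int))
            = ((x ++ [String.ofList [c]]) ++ m.map (fun c => String.ofList [c]),
               s.reverse) := by
          rw [aStep, hget]
          have e1 : (String.ofList [c] == ("(" : String)) = false := by
            rw [show (("(" : String)) = String.ofList ['('] from rfl, beq_one]
            simp [h1]
          have e2 : (String.ofList [c] == (")" : String)) = false := by
            rw [show ((")" : String)) = String.ofList [')'] from rfl, beq_one]
            simp [h2]
          simp only [e1, e2, Bool.false_eq_true, if_false]
          simp [hmap, List.append_assoc]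
        rw [hstep]
        have he' : e = (((x ++ [String.ofList [c]]).length : Nat) : Int) + (m.length : Int) := by
          rw [he]; simp; ring
        rw [show ((x.length : Int)) + 1 = (((x ++ [String.ofList [c]]).length : Nat) : Int) by
          simp]
        rw [ih (x ++ [String.ofList [c]]) s e he' (by
          intro i hi
          exact ⟨(hs i hi).1, by have := (hs i hi).2; simp; omega⟩)]
        rw [show mls (c :: m) x s = mls m (x ++ [String.ofList [c]]) s from by
          simp [mls, h1, h2]]

-- A's while loop pops the reversed stack front-to-back
lemma aWhile_rev : ∀ (s : List Int) (a : List String),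
    aWhile a s.reverse = s.foldl (fun a j => PySem.List.pySetD a j "-1") a := by
  intro s
  induction s with
  | nil => intro a; simp [aWhile]
  | cons j s' ih =>
    intro a
    rw [aWhile]
    split
    · next h => rw [List.getLast?_reverse] at h; simp at h
    · next j1 h =>
        rw [List.getLast?_reverse] at h
        simp only [List.head?_cons, Option.some.injEq] at h
        subst h
        rw [List.dropLast_reverse]
        simp only [List.tail_cons, List.foldl_cons]
        exact ih _

-- B's forward fold computes fwdF
lemma bFwd_eq : ∀ (l : List Char) (acc : List String) (k : Int),
    (l.foldl bFwdStep (acc, k)).1 = acc ++ fwdF l k := by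
  intro l
  induction l with
  | nil => intro acc k; simp [fwdF]
  | cons c t ih =>
    intro acc k
    simp only [List.foldl_cons]
    by_cases h2 : c = ')'
    · subst h2
      by_cases hk : k > 0
      · rw [show bFwdStep (acc, k) ')' = (acc ++ ["1"], k - 1) from by simp [bFwdStep, hk]]
        simp [fwdF, hk, ih]
      · rw [show bFwdStep (acc, k) ')' = (acc ++ ["-1"], k) from by simp [bFwdStep, hk]]
        simp [fwdF, hk, ih]
    · rw [show bFwdStep (acc, k) c
          = (acc ++ [String.ofList [c]], if c = '(' then k + 1 else k) from by
        simp [bFwdStep, h2]]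
      simp [fwdF, h2, ih]

lemma fwdF_len : ∀ (l : List Char) (k : Int), (fwdF l k).length = l.length := by
  intro l
  induction l with
  | nil => intro k; simp [fwdF]
  | cons c t ih =>
    intro k
    rw [fwdF]
    split_ifs <;> simp [ih]

-- B's backward fold over the reversed list computes bRec
lemma bBwd_rev : ∀ (zl : List (Char × String)) (acc : List String),
    zl.reverse.foldl bBwdStep (acc, 0) = (acc ++ (bRec zl).1.reverse, (bRec zl).2) := by
  intro zl
  induction zl with
  | nil => intro acc; simp [bRec]
  | cons p t ih =>
    intro acc
    rw [List.reverse_cons, List.foldl_append, ih]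
    simp only [List.foldl_cons, List.foldl_nil]
    obtain ⟨c0, cs⟩ := p
    by_cases h1 : c0 = '('
    · subst h1
      by_cases h2 : (bRec t).2 > 0
      · rw [show bBwdStep (acc ++ (bRec t).1.reverse, (bRec t).2) ('(', cs)
            = ((acc ++ (bRec t).1.reverse) ++ ["0"], (bRec t).2 - 1) from by
          simp [bBwdStep, h2]]
        simp [bRec, h2, List.append_assoc]
      · rw [show bBwdStep (acc ++ (bRec t).1.reverse, (bRec t).2) ('(', cs)
            = ((acc ++ (bRec t).1.reverse) ++ ["-1"], (bRec t).2) from by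
          simp [bBwdStep, h2]]
        simp [bRec, h2, List.append_assoc]
    · rw [show bBwdStep (acc ++ (bRec t).1.reverse, (bRec t).2) (c0, cs)
          = ((acc ++ (bRec t).1.reverse) ++ [cs],
             if c0 = ')' then (bRec t).2 + 1 else (bRec t).2) from by
        simp [bBwdStep, h1]]
      by_cases h2 : c0 = ')' <;> simp [bRec, h1, h2, List.append_assoc]

-- reversing both components reverses the zip (equal lengths)
lemma zipRev : ∀ (a : List Char) (b : List String), a.length = b.length →
    a.reverse.zip b.reverse = (a.zip b).reverse := by
  intro a
  induction a with
  | nil => intro b h; cases b with | nil => rfl | cons y b' => simp at h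
  | cons c a' ih =>
    intro b h
    cases b with
    | nil => simp at h
    | cons y b' =>
      simp only [List.reverse_cons]
      rw [List.zip_append (by simpa using h)]
      rw [ih b' (by simpa using h)]
      simp

-- B's two passes produce the common mark list
lemma bRec_spec : ∀ (l : List Char) (n : Nat),
    bRec (l.zip (fwdF l (n : Int))) = (specL l n, (uCl l : Int)) := by
  intro l
  induction l with
  | nil => intro n; simp [fwdF, bRec, uCl, specL]
  | cons c t ih =>
    intro n
    by_cases h1 : c = '('
    · subst h1
      have hf : fwdF ('(' :: t) (n : Int)
          = String.ofList ['('] :: fwdF t (((n + 1 : Nat) : Int)) := by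
        rw [fwdF]; simp only [if_neg (by decide : ¬('(' = ')'))]
        norm_num
      rw [hf, List.zip_cons_cons, bRec, ih (n + 1)]
      by_cases hu : uCl t = 0
      · simp [specL, uCl, hu]
      · have hpos : ((uCl t : Nat) : Int) > 0 := by omega
        have hsub : ((uCl t : Nat) : Int) - 1 = ((uCl t - 1 : Nat) : Int) := by omega
        simp [specL, uCl, hu, hsub]
    · by_cases h2 : c = ')'
      · subst h2
        by_cases hn : n = 0
        · subst hn
          have hf : fwdF (')' :: t) ((0 : Nat) : Int) = "-1" :: fwdF t (((0 : Nat) : Int)) := by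
            rw [fwdF]; norm_num
          rw [hf, List.zip_cons_cons, bRec, ih 0]
          simp [specL, uCl]
        · have hpos : ((n : Nat) : Int) > 0 := by omega
          have hcast : ((n : Nat) : Int) - 1 = (((n - 1 : Nat)) : Int) := by omega
          have hf : fwdF (')' :: t) ((n : Nat) : Int) = "1" :: fwdF t (((n - 1 : Nat) : Int)) := by
            rw [fwdF]
            simp [hcast, hn]
          rw [hf, List.zip_cons_cons, bRec, ih (n - 1)]
          simp [specL, uCl, hn]
      · have hf : fwdF (c :: t) ((n : Nat) : Int)
            = String.ofList [c] :: fwdF t ((n : Nat) : Int) := by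
          rw [fwdF]; simp [h1, h2]
        rw [hf, List.zip_cons_cons, bRec, ih n]
        simp [specL, uCl, h1, h2]

-- ===== VERDICT (by name: the statement is the Claim_ definition above) =====
theorem identifyAndReplace_spec : Claim_equal_identifyAndReplace := by
  intro exp _
  unfold Spec_identifyAndReplace
  have hA : identifyAndReplace exp = PySem.Str.join "" (specL exp.toList 0) := by
    unfold identifyAndReplace
    dsimp only
    have h0 : (PySem.List.pyRange 0 (((exp.toList.map (fun c => String.ofList [c])).length : Nat) : Int)).foldl
        aStep (exp.toList.map (fun c => String.ofList [c]), []) =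
        ((mls exp.toList [] []).1, (mls exp.toList [] []).2.reverse) := by
      have := aFold exp.toList [] []
        (((exp.toList.map (fun c => String.ofList [c])).length : Nat) : Int)
        (by simp) (by intro j hj; simp at hj)
      simpa using this
    rw [h0]
    have hm := mls_spec exp.toList [] [] (by intro j hj; simp at hj)
    simp only [List.length_nil, List.nil_append, List.take_nil, List.drop_nil,
      List.append_nil] at hm
    rw [hm]
    simp only [stackWrite, List.foldl_nil]
    rw [aWhile_rev]
    rw [PySem.List.foldl_congr_mem' (surv exp.toList 0)
      (fun a j => PySem.List.pySetD a j "-1") (fun a j => a.set j.toNat "-1") _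
      (fun j hj acc => PySem.List.pySetD_of_nonneg _ _ (surv_nonneg exp.toList 0 j hj))]
    have h2 := surv_fix exp.toList [] 0
    simp only [List.length_nil, List.nil_append] at h2
    rw [h2]
  have hB : identifyAndReplace_alt exp = PySem.Str.join "" (specL exp.toList 0) := by
    unfold identifyAndReplace_alt
    dsimp only
    have hf : (exp.toList.foldl bFwdStep ([], 0)).1 = fwdF exp.toList 0 := by
      simpa using bFwd_eq exp.toList [] 0
    rw [hf]
    rw [zipRev exp.toList (fwdF exp.toList 0) (by rw [fwdF_len])]
    rw [bBwd_rev (exp.toList.zip (fwdF exp.toList 0)) []]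
    have hb := bRec_spec exp.toList 0
    simp only [Nat.cast_zero] at hb
    simp [hb]
  rw [hA, hB]
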